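-- pv_equiv track=rewrite | github.com/iQuHACK/2026-NVIDIA | team-submissions/Phase 2/utils.py | compute_topology_overlaps
-- ===== SOURCE A (Python) =====
-- def compute_topology_overlaps(G2, G4):
--     """
--     Computes the topological invariants I_22, I_24, I_44 based on set overlaps.
--     I_alpha_beta counts how many sets share IDENTICAL elements.
--     """
--
--     # Helper to count identical sets
--     def count_matches(list_a, list_b):
--         matches = 0
--         # Convert to sorted tuples to ensure order doesn't affect equality
--         set_b = set(tuple(sorted(x)) for x in list_b)
--         for item in list_a:
--             if tuple(sorted(item)) in set_b:
--                 matches += 1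
--         return matches
--
--     # For standard LABS/Ising chains, these overlaps are often 0 or specific integers
--     # We implement the general counting logic here.
--     I_22 = count_matches(G2, G2)  # Self overlap is just len(G2)
--     I_44 = count_matches(G4, G4)  # Self overlap is just len(G4)
--     I_24 = 0  # 2-body set vs 4-body set overlap usually 0 as sizes differ
--
--     return {'22': I_22, '44': I_44, '24': I_24}
-- ===== SOURCE B (Python) =====
-- def compute_topology_overlaps(G2, G4):
--     # Self-overlap of a list with itself always equals its length; cross term is hard-coded 0.
--     return {'22': len(G2), '44': len(G4), '24': 0}
-- ===== Notes on version B (the rewrite author's own statement) =====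
-- stated objective: faster
-- what changed: A builds a set of sorted tuples and scans each list against itself; since every element's sorted tuple is in the set built from the same list, B returns the list lengths directly, no sorting or hashing.
import Mathlib
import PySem

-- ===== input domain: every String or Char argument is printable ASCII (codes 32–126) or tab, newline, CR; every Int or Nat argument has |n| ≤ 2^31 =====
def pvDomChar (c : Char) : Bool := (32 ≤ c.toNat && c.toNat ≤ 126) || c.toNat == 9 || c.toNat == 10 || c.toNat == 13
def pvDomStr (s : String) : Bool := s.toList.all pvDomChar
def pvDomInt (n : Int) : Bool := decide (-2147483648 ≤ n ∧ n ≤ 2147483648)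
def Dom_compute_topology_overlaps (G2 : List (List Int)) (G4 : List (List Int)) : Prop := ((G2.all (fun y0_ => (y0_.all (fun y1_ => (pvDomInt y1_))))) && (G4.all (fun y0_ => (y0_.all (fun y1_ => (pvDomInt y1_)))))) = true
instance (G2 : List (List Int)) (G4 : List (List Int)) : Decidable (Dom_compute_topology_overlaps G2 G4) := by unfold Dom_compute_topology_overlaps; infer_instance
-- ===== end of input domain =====

-- B replaces A's set-of-sorted-tuples self-matching by returning the list lengths directly (faster; self-overlap always equals the length).

-- ===== PORT A =====
-- helper count_acc: set of sorted tuples of list_b, then count items of list_a whose sorted tuple is in it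
def pvCountMatches (list_a : List (List Int)) (list_b : List (List Int)) : Int :=
  let set_b : PySem.Set (List Int) :=
    PySem.Set.ofList (list_b.map (fun x => PySem.List.sorted x (fun y => y) false))
  list_a.foldl
    (fun acc item =>
      if PySem.Set.contains set_b (PySem.List.sorted item (fun y => y) false) then acc + 1
      else acc) 0

def compute_topology_overlaps (G2 : List (List Int)) (G4 : List (List Int)) : List (String × Int) :=
  let I_22 := pvCountMatches G2 G2
  let I_44 := pvCountMatches G4 G4
  let I_24 : Int := 0
  [("22", I_22), ("44", I_44), ("24", I_24)]

-- ===== PORT B =====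
def compute_topology_overlaps_alt (G2 : List (List Int)) (G4 : List (List Int)) : List (String × Int) :=
  [("22", (G2.length : Int)), ("44", (G4.length : Int)), ("24", 0)]

-- ===== PRECONDITION & SPEC =====
def Spec_compute_topology_overlaps (G2 : List (List Int)) (G4 : List (List Int)) (out : List (String × Int)) : Prop := out = compute_topology_overlaps_alt G2 G4
instance (G2 : List (List Int)) (G4 : List (List Int)) (out : List (String × Int)) : Decidable (Spec_compute_topology_overlaps G2 G4 out) := by unfold Spec_compute_topology_overlaps; infer_instance

-- ===== CLAIM (what is proved, stated in full; the proofs are below) =====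
def Claim_equal_compute_topology_overlaps : Prop := ∀ (G2 : List (List Int)) (G4 : List (List Int)), Dom_compute_topology_overlaps G2 G4 → Spec_compute_topology_overlaps G2 G4 (compute_topology_overlaps G2 G4)

-- ===== LEMMAS AND PROOFS =====

-- ===== VERDICT (by name: the statement is the Claim_ definition above) =====
-- the fold counts one per item when every item's sorted tuple is in the set
theorem pvFold_all_hit (l : List (List Int)) (sb : PySem.Set (List Int)) (n : Int)
    (h : ∀ x ∈ l, PySem.Set.contains sb (PySem.List.sorted x (fun y => y) false) = true) :
    l.foldl (fun acc item =>
      if PySem.Set.contains sb (PySem.List.sorted item (fun y => y) false) then acc + 1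
      else acc) n = n + l.length := by
  induction l generalizing n with
  | nil => simp
  | cons a t ih =>
    simp only [List.foldl_cons, h a (by simp)]
    rw [ih _ (fun x hx => h x (by simp [hx]))]
    simp; omega

theorem pvCountMatches_self (l : List (List Int)) : pvCountMatches l l = (l.length : Int) := by
  unfold pvCountMatches
  rw [pvFold_all_hit]
  · omega
  · intro x hx
    rw [PySem.Set.contains_iff, PySem.Set.mem_ofList]
    exact List.mem_map.mpr ⟨x, hx, rfl⟩

theorem compute_topology_overlaps_spec : Claim_equal_compute_topology_overlaps := by
  intro G2 G4 _
  unfold Spec_compute_topology_overlaps compute_topology_overlaps compute_topology_overlaps_alt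
  simp [pvCountMatches_self]
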